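-- pv_equiv track=rewrite | github.com/JustinHoyt/interview-practice | HackerRank/set_intersection.py | max_intersection_brute_force
-- ===== SOURCE A (Python) =====
-- def max_intersection_brute_force(sets):
--     if len(sets) <= 1:
--         return -1
--         # map[(0,i)] = map[(o,i-1
--
--     max_intersection = 0
--     best_ignored_intersection = 0
--     for i in range(len(sets)):
--         temp_intersection = set()
--         if i == 0 and len(sets) > 1:
--             temp_intersection = sets[1]
--         else:
--             temp_intersection = sets[0]
--         for j in range(len(sets)):
--             if j != i:
--                 temp_intersection = sets[j] & temp_intersection
--         if len(temp_intersection) > max_intersection: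
--             max_intersection = len(temp_intersection)
--             best_ignored_intersection = i
--     return best_ignored_intersection
-- ===== SOURCE B (Python) =====
-- def max_intersection_brute_force(sets):
--     # One pass with suffix-intersection array + running prefix intersection.
--     if len(sets) <= 1:
--         return -1
--     n = len(sets)
--     # suffix[i] = intersection of sets[i+1:], None meaning "no constraint"
--     suffix = [None] * n
--     running = None
--     for i in range(n - 1, -1, -1):
--         suffix[i] = running
--         running = sets[i] if running is None else sets[i] & running
--     best_size = 0
--     best_index = 0
--     prefix = None
--     for i in range(n):
--         if prefix is None:
--             remaining = suffix[i] if suffix[i] is not None else set()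
--         elif suffix[i] is None:
--             remaining = prefix
--         else:
--             remaining = prefix & suffix[i]
--         if len(remaining) > best_size:
--             best_size = len(remaining)
--             best_index = i
--         prefix = sets[i] if prefix is None else prefix & sets[i]
--     return best_index
-- ===== Notes on version B (the rewrite author's own statement) =====
-- stated objective: faster
-- what changed: A recomputes the intersection of all sets except i from scratch for every i (nested loops); B builds a suffix-intersection array in one backward pass and combines it with a running prefix intersection in one forward pass.
import Mathlib
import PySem

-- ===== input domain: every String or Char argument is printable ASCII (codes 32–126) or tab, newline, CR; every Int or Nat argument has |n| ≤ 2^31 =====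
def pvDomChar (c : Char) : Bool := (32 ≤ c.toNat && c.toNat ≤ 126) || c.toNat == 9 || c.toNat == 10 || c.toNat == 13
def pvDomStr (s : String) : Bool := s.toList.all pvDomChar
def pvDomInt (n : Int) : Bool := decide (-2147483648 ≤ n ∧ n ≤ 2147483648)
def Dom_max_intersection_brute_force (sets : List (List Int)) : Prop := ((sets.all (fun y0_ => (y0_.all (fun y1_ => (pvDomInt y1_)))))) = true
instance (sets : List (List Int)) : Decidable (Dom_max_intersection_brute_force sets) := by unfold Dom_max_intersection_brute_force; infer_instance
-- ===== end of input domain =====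

-- B replaces A's quadratic "re-intersect everything except i" scan by one suffix-intersection
-- array plus a running prefix intersection (objective: faster, asymptotic).

-- ===== PORT A =====
-- Each element of `sets` is a Python set (parameter type list[set[int]]); following the type
-- convention its Lean value is the list of its distinct elements, so both ports read each
-- element through PySem.Set.ofList (identity on duplicate-free lists).
def max_intersection_brute_force (sets : List (List Int)) : Int :=
  let ss : List (PySem.Set Int) := sets.map PySem.Set.ofList
  if ss.length ≤ 1 then -1
  else
    let n := ss.length
    ((List.range n).foldl (fun (st : Nat × Int) i =>
        let seed := if i = 0 ∧ n > 1 then ss.getD 1 [] else ss.getD 0 []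
        let temp := (List.range n).foldl (fun t j =>
            if j ≠ i then PySem.Set.inter (ss.getD j []) t else t) seed
        if temp.length > st.1 then (temp.length, (i : Int)) else st) ((0 : Nat), (0 : Int))).2

-- ===== PORT B =====
-- `prefix & sets[i]` / first prefix
def bPush (pref : Option (List Int)) (s : List Int) : List Int :=
  match pref with
  | none => s
  | some p => PySem.Set.inter p s

-- combine running prefix with the stored suffix (None = no constraint)
def bCombine (pref suf : Option (List Int)) : List Int :=
  match pref, suf with
  | none, none => []
  | none, some t => t
  | some p, none => p
  | some p, some t => PySem.Set.inter p t

-- the backward loop: suffix[i] = running, then running = sets[i] & running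
def bSufs (l : List (List Int)) : List (Option (List Int)) :=
  (l.foldr (fun s (acc : List (Option (List Int)) × Option (List Int)) =>
      (acc.2 :: acc.1,
       some (match acc.2 with | none => s | some t => PySem.Set.inter s t))) ([], none)).1

-- the forward loop over the sets, carrying (prefix, best_size, best_index, i)
def bLoop : List (List Int) → List (Option (List Int)) → Option (List Int) → Nat → Int → Int → Int
  | [], _, _, _, bestIdx, _ => bestIdx
  | s :: rest, sufs, pref, bestSize, bestIdx, i =>
      let remaining := bCombine pref (sufs.headD none)
      if remaining.length > bestSize then
        bLoop rest sufs.tail (some (bPush pref s)) remaining.length i (i + 1)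
      else
        bLoop rest sufs.tail (some (bPush pref s)) bestSize bestIdx (i + 1)

def max_intersection_brute_force_alt (sets : List (List Int)) : Int :=
  let ss : List (PySem.Set Int) := sets.map PySem.Set.ofList
  if ss.length ≤ 1 then -1
  else bLoop ss (bSufs ss) none 0 0 0

-- ===== PRECONDITION & SPEC =====
def Spec_max_intersection_brute_force (sets : List (List Int)) (out : Int) : Prop := out = max_intersection_brute_force_alt sets
instance (sets : List (List Int)) (out : Int) : Decidable (Spec_max_intersection_brute_force sets out) := by unfold Spec_max_intersection_brute_force; infer_instance

-- ===== CLAIM (what is proved, stated in full; the proofs are below) =====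
def Claim_equal_max_intersection_brute_force : Prop := ∀ (sets : List (List Int)), Dom_max_intersection_brute_force sets → Spec_max_intersection_brute_force sets (max_intersection_brute_force sets)

-- ===== LEMMAS AND PROOFS =====

-- specification-side helpers (used only in the proofs)
def runSpec : List (List Int) → Option (List Int)
  | [] => none
  | s :: rest => some (match runSpec rest with | none => s | some t => PySem.Set.inter s t)

def sufsSpec : List (List Int) → List (Option (List Int))
  | [] => []
  | _ :: rest => runSpec rest :: sufsSpec rest

def sizesSpec : Option (List Int) → List (List Int) → List (Option (List Int)) → List Nat
  | _, [], _ => []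
  | p, s :: rest, sufs =>
      (bCombine p (sufs.headD none)).length :: sizesSpec (some (bPush p s)) rest sufs.tail

def pickIdx : Nat → Int → Int → List Nat → Int
  | _, bi, _, [] => bi
  | bs, bi, i, sz :: rest => if sz > bs then pickIdx sz i (i+1) rest else pickIdx bs bi (i+1) rest

lemma bSufs_pair (l : List (List Int)) :
    (l.foldr (fun s (acc : List (Option (List Int)) × Option (List Int)) =>
      (acc.2 :: acc.1,
       some (match acc.2 with | none => s | some t => PySem.Set.inter s t))) ([], none))
    = (sufsSpec l, runSpec l) := by
  induction l with
  | nil => rfl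
  | cons s rest ih => simp [List.foldr, ih, sufsSpec, runSpec]

lemma bSufs_eq (l : List (List Int)) : bSufs l = sufsSpec l := by
  unfold bSufs; rw [bSufs_pair]

lemma bLoop_eq (l : List (List Int)) : ∀ sufs p bs bi i,
    bLoop l sufs p bs bi i = pickIdx bs bi i (sizesSpec p l sufs) := by
  induction l with
  | nil => intro sufs p bs bi i; rfl
  | cons s rest ih =>
      intro sufs p bs bi i
      simp only [bLoop, sizesSpec, pickIdx]
      split <;> apply ih

lemma arange (f : Nat → Nat) : ∀ (k a : Nat) (bs : Nat) (bi : Int),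
    (((List.range' a k).foldl (fun (st : Nat × Int) i =>
        if f i > st.1 then (f i, (i : Int)) else st) (bs, bi))).2
    = pickIdx bs bi (a : Int) ((List.range' a k).map f) := by
  intro k
  induction k with
  | zero => intro a bs bi; rfl
  | succ k ih =>
      intro a bs bi
      rw [List.range'_succ]
      simp only [List.foldl, List.map, pickIdx]
      split
      · rw [ih (a+1)]; push_cast; ring_nf
      · rw [ih (a+1)]; push_cast; ring_nf

lemma sizesSpec_length : ∀ (l : List (List Int)) p sufs, (sizesSpec p l sufs).length = l.length := by
  intro l
  induction l with
  | nil => intro p sufs; rfl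
  | cons s rest ih => intro p sufs; simp [sizesSpec, ih]

lemma sizesSpec_getElem : ∀ (l : List (List Int)) p sufs (k : Nat) (h : k < l.length),
    (sizesSpec p l sufs)[k]'(by rw [sizesSpec_length]; exact h)
    = (bCombine ((l.take k).foldl (fun q s => some (bPush q s)) p) (sufs.getD k none)).length := by
  intro l
  induction l with
  | nil => intro p sufs k h; simp at h
  | cons s rest ih =>
      intro p sufs k h
      cases k with
      | zero => cases sufs <;> simp [sizesSpec, List.getD]
      | succ k =>
          have hk : k < rest.length := by simpa using h
          simp only [sizesSpec, List.getElem_cons_succ, List.take_succ_cons, List.foldl_cons]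
          rw [ih (some (bPush p s)) sufs.tail k hk]
          congr 1
          cases sufs <;> rfl

-- membership/nodup facts
lemma runSpec_eq_none (l : List (List Int)) : runSpec l = none ↔ l = [] := by
  cases l <;> simp [runSpec]

lemma mem_runSpec (x : Int) : ∀ (l : List (List Int)) (t : List Int), runSpec l = some t →
    (x ∈ t ↔ ∀ u ∈ l, x ∈ u) := by
  intro l
  induction l with
  | nil => intro t h; simp [runSpec] at h
  | cons s rest ih =>
      intro t h
      cases hr : runSpec rest with
      | none =>
          have he : rest = [] := (runSpec_eq_none rest).mp hr
          subst he
          simp only [runSpec] at h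
          injection h with h'
          subst h'
          simp
      | some r =>
          simp only [runSpec, hr] at h
          injection h with h'
          subst h'
          simp only [PySem.Set.mem_inter, ih r hr, List.mem_cons]
          constructor
          · rintro ⟨h1, h2⟩ u hu
            rcases hu with rfl | hu
            · exact h1
            · exact h2 u hu
          · intro hall
            exact ⟨hall s (Or.inl rfl), fun u hu => hall u (Or.inr hu)⟩
  
lemma nodup_runSpec : ∀ (l : List (List Int)) (t : List Int), (∀ u ∈ l, u.Nodup) →
    runSpec l = some t → t.Nodup := by
  intro l
  induction l with
  | nil => intro t _ h; simp [runSpec] at h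
  | cons s rest ih =>
      intro t hnd h
      cases hr : runSpec rest with
      | none =>
          simp only [runSpec, hr] at h
          injection h with h'
          subst h'
          exact hnd s (by simp)
      | some r =>
          simp only [runSpec, hr] at h
          injection h with h'
          subst h'
          exact PySem.Set.nodup_inter _ _ (hnd s (by simp))

lemma sufsSpec_getD : ∀ (l : List (List Int)) (k : Nat),
    (sufsSpec l).getD k none = runSpec (l.drop (k+1)) := by
  intro l
  induction l with
  | nil => intro k; simp [sufsSpec, runSpec, List.getD]
  | cons s rest ih =>
      intro k
      cases k with
      | zero => simp [sufsSpec, List.getD]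
      | succ k => simpa [sufsSpec, List.getD] using ih k

-- prefix accumulator facts
lemma prefFold_some : ∀ (l : List (List Int)) (p : List Int),
    ∃ q, l.foldl (fun q s => some (bPush q s)) (some p) = some q ∧
      (∀ x : Int, x ∈ q ↔ x ∈ p ∧ ∀ u ∈ l, x ∈ u) ∧ (p.Nodup → q.Nodup) := by
  intro l
  induction l with
  | nil => intro p; exact ⟨p, rfl, fun x => by simp, id⟩
  | cons s rest ih =>
      intro p
      obtain ⟨q, hq, hmem, hnd⟩ := ih (bPush (some p) s)
      refine ⟨q, by simpa using hq, ?_, ?_⟩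
      · intro x
        rw [hmem x]
        simp only [bPush, PySem.Set.mem_inter, List.mem_cons]
        constructor
        · rintro ⟨⟨h1, h2⟩, h3⟩
          exact ⟨h1, fun u hu => by rcases hu with rfl | hu; exact h2; exact h3 u hu⟩
        · rintro ⟨h1, h2⟩
          exact ⟨⟨h1, h2 s (Or.inl rfl)⟩, fun u hu => h2 u (Or.inr hu)⟩
      · intro hp
        exact hnd (PySem.Set.nodup_inter _ _ hp)

-- inner fold of A: membership
lemma aInner_mem (x : Int) (g : Nat → List Int) (i : Nat) : ∀ (js : List Nat) (t0 : List Int),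
    (x ∈ js.foldl (fun t j => if j ≠ i then PySem.Set.inter (g j) t else t) t0
      ↔ x ∈ t0 ∧ ∀ j ∈ js, j ≠ i → x ∈ g j) := by
  intro js
  induction js with
  | nil => intro t0; simp
  | cons j rest ih =>
      intro t0
      simp only [List.foldl_cons]
      by_cases hj : j = i
      · subst hj
        rw [if_neg (by simp), ih]
        simp only [List.mem_cons]
        constructor
        · rintro ⟨h1, h2⟩
          exact ⟨h1, fun a ha hne => by rcases ha with rfl | ha; exact absurd rfl hne; exact h2 a ha hne⟩
        · rintro ⟨h1, h2⟩
          exact ⟨h1, fun a ha hne => h2 a (Or.inr ha) hne⟩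
      · rw [if_pos hj, ih]
        simp only [PySem.Set.mem_inter, List.mem_cons]
        constructor
        · rintro ⟨⟨h1, h2⟩, h3⟩
          refine ⟨h2, fun a ha hne => ?_⟩
          rcases ha with rfl | ha
          · exact h1
          · exact h3 a ha hne
        · rintro ⟨h1, h2⟩
          exact ⟨⟨h2 j (Or.inl rfl) hj, h1⟩, fun a ha hne => h2 a (Or.inr ha) hne⟩

-- inner fold of A: nodup
lemma aInner_nodup (g : Nat → List Int) (i : Nat) : ∀ (js : List Nat) (t0 : List Int),
    t0.Nodup → (∀ j, (g j).Nodup) →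
    (js.foldl (fun t j => if j ≠ i then PySem.Set.inter (g j) t else t) t0).Nodup := by
  intro js
  induction js with
  | nil => intro t0 h _; exact h
  | cons j rest ih =>
      intro t0 h hg
      simp only [List.foldl_cons]
      apply ih
      · split
        · exact PySem.Set.nodup_inter _ _ (hg j)
        · exact h
      · exact hg

-- index bridge: "all sets except index k" as take/drop
lemma index_bridge (P : List Int → Prop) (ss : List (List Int)) (k : Nat) :
    ((∀ j, j < ss.length → j ≠ k → P (ss.getD j [])) ↔
      (∀ u ∈ ss.take k, P u) ∧ (∀ u ∈ ss.drop (k+1), P u)) := by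
  constructor
  · intro h
    constructor
    · intro u hu
      obtain ⟨j, hj, rfl⟩ := List.getElem_of_mem hu
      have hjk : j < k := by
        have := hj; simp [List.length_take] at this; omega
      have hjl : j < ss.length := by
        have := hj; simp [List.length_take] at this; omega
      have : (ss.take k)[j]'hj = ss[j]'hjl := List.getElem_take ..
      rw [this, ← List.getD_eq_getElem ss [] hjl]
      exact h j hjl (by omega)
    · intro u hu
      obtain ⟨j, hj, rfl⟩ := List.getElem_of_mem hu
      have hjl : k + 1 + j < ss.length := by
        have := hj; simp at this; omega
      have : (ss.drop (k+1))[j]'hj = ss[k+1+j]'hjl := List.getElem_drop ..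
      rw [this, ← List.getD_eq_getElem ss [] hjl]
      exact h (k+1+j) hjl (by omega)
  · rintro ⟨h1, h2⟩ j hj hne
    rcases Nat.lt_or_ge j k with hlt | hge
    · have hj' : j < (ss.take k).length := by simp [List.length_take]; omega
      have he : (ss.take k)[j]'hj' = ss[j]'hj := List.getElem_take ..
      rw [List.getD_eq_getElem ss [] hj, ← he]
      exact h1 _ (List.getElem_mem hj')
    · have hgt : k + 1 ≤ j := by omega
      have hj' : j - (k+1) < (ss.drop (k+1)).length := by simp [List.length_drop]; omega
      have he : (ss.drop (k+1))[j - (k+1)]'hj' = ss[k+1+(j-(k+1))]'(by omega) := List.getElem_drop ..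
      rw [List.getD_eq_getElem ss [] hj]
      have : ss[j]'hj = ss[k+1+(j-(k+1))]'(by omega) := by
        congr 1; omega
      rw [this, ← he]
      exact h2 _ (List.getElem_mem hj')

-- the central per-index equality of the two size lists
lemma sizes_eq (ss : List (List Int)) (hn : 2 ≤ ss.length) (hnd : ∀ u ∈ ss, u.Nodup) :
    (List.range' 0 ss.length).map (fun i =>
      ((List.range' 0 ss.length).foldl (fun t j =>
          if j ≠ i then PySem.Set.inter (ss.getD j []) t else t)
        (if i = 0 ∧ ss.length > 1 then ss.getD 1 [] else ss.getD 0 [])).length)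
    = sizesSpec none ss (sufsSpec ss) := by
  have hndD : ∀ j, (ss.getD j []).Nodup := by
    intro j
    rcases Nat.lt_or_ge j ss.length with hj | hj
    · rw [List.getD_eq_getElem ss [] hj]
      exact hnd _ (List.getElem_mem hj)
    · rw [List.getD_eq_default ss [] hj]
      exact List.nodup_nil
  apply List.ext_getElem
  · simp [sizesSpec_length]
  · intro k hk1 hk2
    have hkn : k < ss.length := by simpa [sizesSpec_length] using hk2
    rw [List.getElem_map]
    rw [sizesSpec_getElem ss none (sufsSpec ss) k hkn]
    have hidx : (List.range' 0 ss.length)[k]'(by simpa using hkn) = k := by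
      simp [List.getElem_range']
    rw [hidx]
    -- A's temp for index k
    set g : Nat → List Int := fun j => ss.getD j [] with hg
    set seed := (if k = 0 ∧ ss.length > 1 then ss.getD 1 [] else ss.getD 0 []) with hseed
    set tempA := (List.range' 0 ss.length).foldl
        (fun t j => if j ≠ k then PySem.Set.inter (ss.getD j []) t else t) seed with htempA
    -- B's remaining for index k
    set remB := bCombine ((ss.take k).foldl (fun q s => some (bPush q s)) none)
        ((sufsSpec ss).getD k none) with hremB
    -- membership characterisations
    have hA : ∀ x : Int, x ∈ tempA ↔ (∀ j, j < ss.length → j ≠ k → x ∈ ss.getD j []) := by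
      intro x
      rw [htempA, aInner_mem x g k]
      have hmem : ∀ j, j ∈ List.range' 0 ss.length ↔ j < ss.length := by
        intro j; simp [List.mem_range']
      constructor
      · rintro ⟨h1, h2⟩ j hj hne
        exact h2 j ((hmem j).mpr hj) hne
      · intro h
        refine ⟨?_, fun j hj hne => h j ((hmem j).mp hj) hne⟩
        rw [hseed]
        by_cases hk0 : k = 0
        · rw [if_pos ⟨hk0, by omega⟩]
          exact h 1 (by omega) (by omega)
        · rw [if_neg (by tauto)]
          exact h 0 (by omega) (Ne.symm hk0)
    have hAnd : tempA.Nodup := by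
      rw [htempA]
      apply aInner_nodup g k
      · rw [hseed]; split <;> exact hndD _
      · exact hndD
    have hB : (∀ x : Int, x ∈ remB ↔ (∀ j, j < ss.length → j ≠ k → x ∈ ss.getD j [])) ∧ remB.Nodup := by
      have hTD : ∀ u ∈ ss.take k, u.Nodup := fun u hu => hnd u (List.mem_of_mem_take hu)
      have hDD : ∀ u ∈ ss.drop (k+1), u.Nodup := fun u hu => hnd u (List.mem_of_mem_drop hu)
      rw [hremB, sufsSpec_getD]
      rcases Nat.eq_zero_or_pos k with hk0 | hkpos
      · subst hk0
        -- prefix = none, suffix must exist since ss.length ≥ 2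
        cases hr : runSpec (ss.drop 1) with
        | none =>
            exfalso
            have := (runSpec_eq_none _).mp hr
            have : ss.length ≤ 1 := by
              have := congrArg List.length this; simp at this; omega
            omega
        | some t =>
            simp only [List.take_zero, List.foldl_nil, bCombine]
            constructor
            · intro x
              rw [mem_runSpec x _ t hr]
              rw [index_bridge (x ∈ ·) ss 0]
              simp
            · exact nodup_runSpec _ t hDD hr
      · -- k ≥ 1 : prefix is some
        obtain ⟨a, tl, rfl⟩ : ∃ a tl, ss = a :: tl := by
          cases ss with
          | nil => simp at hn
          | cons a tl => exact ⟨a, tl, rfl⟩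
        obtain ⟨k', rfl⟩ : ∃ k', k = k' + 1 := ⟨k - 1, by omega⟩
        simp only [List.take_succ_cons, List.foldl_cons]
        obtain ⟨q, hq, hqmem, hqnd⟩ := prefFold_some (tl.take k') a
        rw [show bPush none a = a from rfl, hq]
        cases hr : runSpec ((a :: tl).drop (k' + 1 + 1)) with
        | none =>
            simp only [bCombine]
            constructor
            · intro x
              rw [hqmem x]
              rw [index_bridge (x ∈ ·) (a :: tl) (k' + 1)]
              have : (a :: tl).drop (k' + 1 + 1) = [] := (runSpec_eq_none _).mp hr
              simp [this]
            · exact hqnd (hnd a (by simp))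
        | some t =>
            simp only [bCombine]
            constructor
            · intro x
              rw [PySem.Set.mem_inter, hqmem x, mem_runSpec x _ t hr]
              rw [index_bridge (x ∈ ·) (a :: tl) (k' + 1)]
              simp
            · exact PySem.Set.nodup_inter _ _ (hqnd (hnd a (by simp)))
    -- equal length via Perm of nodup lists with equal membership
    have hperm : tempA.Perm remB := by
      rw [List.perm_ext_iff_of_nodup hAnd hB.2]
      intro x
      rw [hA x, hB.1 x]
    exact hperm.length_eq

-- ===== VERDICT (by name: the statement is the Claim_ definition above) =====
theorem max_intersection_brute_force_spec : Claim_equal_max_intersection_brute_force := by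
  intro sets _
  unfold Spec_max_intersection_brute_force
  unfold max_intersection_brute_force max_intersection_brute_force_alt
  by_cases h : (sets.map PySem.Set.ofList).length ≤ 1
  · simp only [h, if_true]
  · simp only [h, if_false]
    set ss := sets.map PySem.Set.ofList with hss
    have hn : 2 ≤ ss.length := by omega
    have hnd : ∀ u ∈ ss, u.Nodup := by
      intro u hu
      rw [hss] at hu
      obtain ⟨v, _, rfl⟩ := List.mem_map.mp hu
      exact PySem.Set.nodup_ofList v
    rw [bSufs_eq, bLoop_eq]
    rw [show List.range ss.length = List.range' 0 ss.length from List.range_eq_range']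
    rw [arange (fun i => ((List.range' 0 ss.length).foldl (fun t j =>
          if j ≠ i then PySem.Set.inter (ss.getD j []) t else t)
        (if i = 0 ∧ ss.length > 1 then ss.getD 1 [] else ss.getD 0 [])).length) ss.length 0 0 0]
    rw [sizes_eq ss hn hnd]
    norm_num
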